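-- pv_equiv track=rewrite | github.com/Hajin74/problem-solving | 프로그래머스/lv1/82612. 부족한 금액 계산하기/부족한 금액 계산하기.py | solution
-- ===== SOURCE A (Python) =====
-- def solution(price, money, count):
--     result = money
--     for i in range(1, count + 1):
--         result -= price * i
--     if result < 0:
--         return -result
--     else:
--         return 0
-- ===== SOURCE B (Python) =====
-- def solution(price, money, count):
--     n = count if count > 0 else 0
--     total = price * (n * (n + 1) // 2)
--     return total - money if total > money else 0
-- ===== Notes on version B (the rewrite author's own statement) =====
-- stated objective: faster
-- what changed: replaces the O(count) subtraction loop with the closed-form arithmetic series price*count*(count+1)//2 and a single comparison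
import Mathlib
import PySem

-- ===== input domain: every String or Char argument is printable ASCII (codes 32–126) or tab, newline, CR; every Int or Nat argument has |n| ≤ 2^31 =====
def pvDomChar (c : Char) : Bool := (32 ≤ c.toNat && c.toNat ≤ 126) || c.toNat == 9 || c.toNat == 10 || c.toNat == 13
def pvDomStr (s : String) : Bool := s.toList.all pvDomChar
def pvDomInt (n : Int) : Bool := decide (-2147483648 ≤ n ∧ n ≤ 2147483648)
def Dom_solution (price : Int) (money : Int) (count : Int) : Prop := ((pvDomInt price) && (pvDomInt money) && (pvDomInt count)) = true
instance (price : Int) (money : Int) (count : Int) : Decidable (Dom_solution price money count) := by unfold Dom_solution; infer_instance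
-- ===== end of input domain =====

-- B replaces A's O(count) subtraction loop by the closed-form arithmetic series (faster).

-- ===== PORT A =====
def solution (price : Int) (money : Int) (count : Int) : Int :=
  let result := (PySem.List.pyRange 1 (count + 1) 1).foldl (fun r i => r - price * i) money
  if result < 0 then -result else 0

-- ===== PORT B =====
def solution_alt (price : Int) (money : Int) (count : Int) : Int :=
  let n : Int := if count > 0 then count else 0
  let total := price * PySem.Int.floordiv (n * (n + 1)) 2
  if total > money then total - money else 0

-- ===== PRECONDITION & SPEC =====
def Spec_solution (price : Int) (money : Int) (count : Int) (out : Int) : Prop := out = solution_alt price money count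
instance (price : Int) (money : Int) (count : Int) (out : Int) : Decidable (Spec_solution price money count out) := by unfold Spec_solution; infer_instance

-- ===== CLAIM (what is proved, stated in full; the proofs are below) =====
def Claim_equal_solution : Prop := ∀ (price : Int) (money : Int) (count : Int), Dom_solution price money count → Spec_solution price money count (solution price money count)

-- ===== LEMMAS AND PROOFS =====

-- sum 1..n as a recursive Int value
def triSum : Nat → Int
  | 0 => 0
  | n + 1 => triSum n + (n + 1)

theorem two_mul_triSum (n : Nat) : 2 * triSum n = (n : Int) * (n + 1) := by
  induction n with
  | zero => simp [triSum]
  | succ k ih => simp only [triSum]; push_cast; rw [mul_add, ih]; ring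

theorem foldl_sub_range (price : Int) (n : Nat) (m : Int) :
    (List.map (fun k : Nat => (1 : Int) + (k : Int)) (List.range n)).foldl (fun r i => r - price * i) m
      = m - price * triSum n := by
  induction n generalizing m with
  | zero => simp [triSum]
  | succ k ih =>
    rw [List.range_succ, List.map_append, List.foldl_append, ih]
    simp [triSum]; ring

theorem solution_spec : Claim_equal_solution := by
  intro price money count _
  unfold Spec_solution solution solution_alt
  rw [PySem.List.pyRange_one]
  have hrw : count + 1 - 1 = count := by ring
  rw [hrw, foldl_sub_range]
  by_cases hc : count > 0
  · have hn : ((count.toNat : Int)) = count := Int.toNat_of_nonneg (le_of_lt hc)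
    have h2 : 2 * triSum count.toNat = count * (count + 1) := by
      rw [two_mul_triSum, hn]
    have hfd : PySem.Int.floordiv (count * (count + 1)) 2 = triSum count.toNat := by
      rw [PySem.Int.floordiv_eq_iff_of_pos (by omega)]; omega
    simp only [hc, if_pos]
    rw [hfd]
    set t := price * triSum count.toNat
    split_ifs <;> omega
  · have hn : count.toNat = 0 := by omega
    simp only [hc, hn, triSum]
    simp [PySem.Int.floordiv]
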